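-- pv_equiv track=rewrite | github.com/sunilpshenoy/Echo | enhanced_jarvis.py | _prioritize_suggestions
-- ===== SOURCE A (Python) =====
-- from typing import Dict, List, Any, Optional
--
-- def _prioritize_suggestions(suggestions: List[str]) -> List[str]:
--     """Prioritize suggestions by impact and effort"""
--     # Simple prioritization - can be enhanced with ML
--     priority_order = [
--         "color scheme",
--         "typography",
--         "layout",
--         "components",
--         "accessibility",
--         "performance"
--     ]
--
--     prioritized = []
--     for priority in priority_order:
--         for suggestion in suggestions:
--             if priority in suggestion.lower() and suggestion not in prioritized:
--                 prioritized.append(suggestion)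
--
--     # Add remaining suggestions
--     for suggestion in suggestions:
--         if suggestion not in prioritized:
--             prioritized.append(suggestion)
--
--     return prioritized
-- ===== SOURCE B (Python) =====
-- from typing import List
--
-- def _prioritize_suggestions(suggestions: List[str]) -> List[str]:
--     """Bucket each distinct suggestion by the first priority keyword it contains, then concatenate."""
--     priority_order = [
--         "color scheme",
--         "typography",
--         "layout",
--         "components",
--         "accessibility",
--         "performance",
--     ]
--
--     def rank(s: str) -> int:
--         low = s.lower()
--         for i, p in enumerate(priority_order):
--             if p in low:
--                 return i
--         return len(priority_order)
--
--     buckets = [[] for _ in range(len(priority_order) + 1)]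
--     for s in dict.fromkeys(suggestions):
--         buckets[rank(s)].append(s)
--     return [s for b in buckets for s in b]
-- ===== Notes on version B (the rewrite author's own statement) =====
-- stated objective: faster
-- what changed: Replaces A's keyword-by-keyword rescans of the suggestion list with 'not in prioritized' list-membership tests by a single pass: dedup once via dict.fromkeys (hashed), compute each suggestion's first-matching-keyword rank, drop it into one of 7 buckets, and concatenate the buckets.
import Mathlib
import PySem

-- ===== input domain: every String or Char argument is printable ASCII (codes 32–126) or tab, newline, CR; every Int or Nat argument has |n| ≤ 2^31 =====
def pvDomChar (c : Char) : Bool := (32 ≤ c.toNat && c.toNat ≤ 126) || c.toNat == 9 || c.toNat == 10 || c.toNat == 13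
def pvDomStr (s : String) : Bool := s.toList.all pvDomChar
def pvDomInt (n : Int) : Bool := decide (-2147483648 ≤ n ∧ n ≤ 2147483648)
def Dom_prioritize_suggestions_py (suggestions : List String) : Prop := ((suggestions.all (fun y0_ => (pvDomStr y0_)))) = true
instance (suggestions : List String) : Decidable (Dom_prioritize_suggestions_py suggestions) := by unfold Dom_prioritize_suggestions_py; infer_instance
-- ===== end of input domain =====

-- B replaces A's keyword-by-keyword rescans with membership tests against the growing result
-- by a single bucketing pass over the deduplicated input (alternative decomposition, same result).

def pvPriorityOrder : List String :=
  ["color scheme", "typography", "layout", "components", "accessibility", "performance"]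

-- ===== PORT A =====
def prioritize_suggestions_py (suggestions : List String) : List String :=
  let prioritized : List String :=
    pvPriorityOrder.foldl (fun prioritized priority =>
      suggestions.foldl (fun prioritized suggestion =>
        if PySem.Str.isIn priority (PySem.Str.lower suggestion) && !(prioritized.contains suggestion)
        then prioritized ++ [suggestion] else prioritized) prioritized) []
  suggestions.foldl (fun prioritized suggestion =>
    if !(prioritized.contains suggestion) then prioritized ++ [suggestion]
    else prioritized) prioritized

-- ===== PORT B =====
-- rank s = index of the first priority keyword contained in s.lower(), else 6 (Source B's `rank`)
def pvRankAux : List String → String → Nat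
  | [], _ => 0
  | p :: ps, low => if PySem.Str.isIn p low then 0 else pvRankAux ps low + 1

def pvRank (s : String) : Nat := pvRankAux pvPriorityOrder (PySem.Str.lower s)

def prioritize_suggestions_py_alt (suggestions : List String) : List String :=
  let buckets0 : List (List String) := List.replicate (pvPriorityOrder.length + 1) []
  let buckets := (PySem.List.dedup suggestions).foldl
      (fun bs s => bs.modify (pvRank s) (fun b => b ++ [s])) buckets0
  buckets.foldl (fun out b => out ++ b) []

-- ===== PRECONDITION & SPEC =====
def Spec_prioritize_suggestions_py (suggestions : List String) (out : List String) : Prop := out = prioritize_suggestions_py_alt suggestions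
instance (suggestions : List String) (out : List String) : Decidable (Spec_prioritize_suggestions_py suggestions out) := by unfold Spec_prioritize_suggestions_py; infer_instance

-- ===== CLAIM (what is proved, stated in full; the proofs are below) =====
def Claim_equal_prioritize_suggestions_py : Prop := ∀ (suggestions : List String), Dom_prioritize_suggestions_py suggestions → Spec_prioritize_suggestions_py suggestions (prioritize_suggestions_py suggestions)

-- ===== LEMMAS AND PROOFS =====

-- bucket i = the distinct suggestions of rank i, in first-occurrence order
def pvBucket (sugg : List String) (i : Nat) : List String :=
  (PySem.List.dedup sugg).filter (fun s => pvRank s == i)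

-- concatenation of buckets 0..k-1 (A's accumulator after the first k priority passes)
def pvAcc (sugg : List String) (k : Nat) : List String :=
  ((List.range k).map (pvBucket sugg)).flatten

lemma pvRankAux_cons (p : String) (t : List String) (low : String) :
    pvRankAux (p :: t) low = if PySem.Str.isIn p low then 0 else pvRankAux t low + 1 := rfl

lemma pvRankAux_le (ps : List String) (low : String) : pvRankAux ps low ≤ ps.length := by
  induction ps with
  | nil => simp [pvRankAux]
  | cons p t ih =>
    rw [pvRankAux_cons]
    split <;> simp [Nat.succ_le_succ ih]

lemma pvRankAux_le_of_isIn (ps : List String) (low : String) (j : Nat) (hj : j < ps.length)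
    (h : PySem.Str.isIn (ps.getD j "") low = true) : pvRankAux ps low ≤ j := by
  induction ps generalizing j with
  | nil => simp at hj
  | cons p t ih =>
    rw [pvRankAux_cons]
    by_cases hp : PySem.Str.isIn p low = true
    · rw [if_pos hp]; omega
    · rw [if_neg hp]
      cases j with
      | zero => simp at h; simp [h] at hp
      | succ j =>
        have := ih j (by simpa using hj) (by simpa using h)
        omega

lemma pvRankAux_isIn_self (ps : List String) (low : String) (h : pvRankAux ps low < ps.length) :
    PySem.Str.isIn (ps.getD (pvRankAux ps low) "") low = true := by
  induction ps with
  | nil => simp at h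
  | cons p t ih =>
    rw [pvRankAux_cons] at h ⊢
    by_cases hp : PySem.Str.isIn p low = true
    · rw [if_pos hp]; simpa using hp
    · rw [if_neg hp] at h ⊢
      have h' : pvRankAux t low < t.length := by simp at h; omega
      simpa using ih h'

lemma pvRank_le (s : String) : pvRank s ≤ 6 := pvRankAux_le _ _

lemma pvRank_eq_iff (s : String) (k : Nat) (hk : k < 6) :
    (PySem.Str.isIn (pvPriorityOrder.getD k "") (PySem.Str.lower s) = true ∧ ¬ pvRank s < k)
      ↔ pvRank s = k := by
  have hlen : pvPriorityOrder.length = 6 := rfl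
  constructor
  · rintro ⟨h, hlt⟩
    have hle : pvRank s ≤ k :=
      pvRankAux_le_of_isIn pvPriorityOrder (PySem.Str.lower s) k (by omega) h
    omega
  · intro h
    refine ⟨?_, by omega⟩
    have h6 : pvRankAux pvPriorityOrder (PySem.Str.lower s) < pvPriorityOrder.length := by
      have : pvRank s = pvRankAux pvPriorityOrder (PySem.Str.lower s) := rfl
      omega
    have hIn := pvRankAux_isIn_self pvPriorityOrder (PySem.Str.lower s) h6
    have hr : pvRankAux pvPriorityOrder (PySem.Str.lower s) = k := h
    rwa [hr] at hIn

-- dedup's left recursion, from the PySem Set lemmas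
lemma pvDedup_cons (x : String) (l : List String) :
    PySem.List.dedup (x :: l) = x :: (PySem.List.dedup l).filter (fun y => !(y == x)) := by
  simp [pysem, PySem.Set.discard]

-- dedup commutes with an element-wise filter
lemma pvDedup_filter (l : List String) (p : String → Bool) :
    PySem.List.dedup (l.filter p) = (PySem.List.dedup l).filter p := by
  induction l with
  | nil => rfl
  | cons x t ih =>
    by_cases hx : p x
    · rw [List.filter_cons_of_pos hx, pvDedup_cons, pvDedup_cons, ih]
      rw [List.filter_cons_of_pos hx, List.filter_filter, List.filter_filter]
      congr 1
      apply List.filter_congr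
      intro y _
      rw [Bool.and_comm]
    · rw [List.filter_cons_of_neg (by simpa using hx), pvDedup_cons, ih]
      rw [List.filter_cons_of_neg (by simpa using hx), List.filter_filter]
      apply List.filter_congr
      intro y _
      rw [Bool.not_eq_true] at hx
      by_cases hyx : y = x
      · subst hyx; simp [hx]
      · simp [hyx]

lemma mem_pvAcc (sugg : List String) (k : Nat) (s : String) :
    s ∈ pvAcc sugg k ↔ s ∈ sugg ∧ pvRank s < k := by
  simp only [pvAcc, pvBucket, List.mem_flatten, List.mem_map, List.mem_range]
  constructor
  · rintro ⟨L, ⟨i, hi, rfl⟩, hs⟩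
    rw [List.mem_filter, PySem.List.mem_dedup] at hs
    refine ⟨hs.1, ?_⟩
    have : pvRank s = i := by simpa using hs.2
    omega
  · rintro ⟨hs, hr⟩
    exact ⟨_, ⟨pvRank s, hr, rfl⟩, by rw [List.mem_filter, PySem.List.mem_dedup]; simp [hs]⟩

-- A's guarded append loop = append the still-unseen distinct matching elements
lemma pvFoldG (cond : String → Bool) (l : List String) (acc : List String) :
    l.foldl (fun ac s => if cond s && !(ac.contains s) then ac ++ [s] else ac) acc
      = acc ++ (PySem.List.dedup (l.filter cond)).filter (fun s => !(acc.contains s)) := by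
  induction l generalizing acc with
  | nil => simp
  | cons x t ih =>
    simp only [List.foldl_cons]
    by_cases hc : cond x
    · by_cases hm : x ∈ acc
      · rw [if_neg (by simp [hc, hm]), ih]
        rw [List.filter_cons_of_pos hc, pvDedup_cons]
        rw [List.filter_cons_of_neg (by simp [hm]), List.filter_filter]
        congr 1
        apply List.filter_congr
        intro y _
        by_cases hyx : y = x
        · subst hyx; simp [hm]
        · simp [hyx]
      · rw [if_pos (by simp [hc, hm]), ih]
        rw [List.filter_cons_of_pos hc, pvDedup_cons]
        rw [List.filter_cons_of_pos (by simp [hm]), List.append_assoc]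
        congr 1
        rw [List.singleton_append]
        congr 1
        rw [List.filter_filter]
        apply List.filter_congr
        intro y _
        by_cases hyx : y = x
        · subst hyx; simp
        · simp [hyx]
    · rw [if_neg (by simp [hc]), ih, List.filter_cons_of_neg (by simpa using hc)]

-- one outer pass of A: from buckets 0..k-1 to buckets 0..k
lemma pvStepA (sugg : List String) (k : Nat) (hk : k < 6) :
    sugg.foldl (fun prioritized suggestion =>
        if PySem.Str.isIn (pvPriorityOrder.getD k "") (PySem.Str.lower suggestion)
            && !(prioritized.contains suggestion)
        then prioritized ++ [suggestion] else prioritized) (pvAcc sugg k)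
      = pvAcc sugg (k + 1) := by
  rw [pvFoldG (fun s => PySem.Str.isIn (pvPriorityOrder.getD k "") (PySem.Str.lower s)),
    pvDedup_filter, List.filter_filter]
  have hfc : (PySem.List.dedup sugg).filter
      (fun s => !((pvAcc sugg k).contains s)
        && PySem.Str.isIn (pvPriorityOrder.getD k "") (PySem.Str.lower s)) = pvBucket sugg k := by
    apply List.filter_congr
    intro s hs
    have hsm : s ∈ sugg := (PySem.List.mem_dedup _ _).mp hs
    by_cases hr : pvRank s = k
    · have hIn := ((pvRank_eq_iff s k hk).mpr hr).1
      have hnm : s ∉ pvAcc sugg k := by rw [mem_pvAcc]; rintro ⟨-, h⟩; omega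
      simp at hIn
      simp [hIn, hnm, hr]
    · by_cases hlt : pvRank s < k
      · have hmem : s ∈ pvAcc sugg k := (mem_pvAcc sugg k s).mpr ⟨hsm, hlt⟩
        simp [hmem, hr]
      · have hIn : ¬ PySem.Str.isIn (pvPriorityOrder.getD k "") (PySem.Str.lower s) = true := by
          intro hIn
          exact hr ((pvRank_eq_iff s k hk).mp ⟨hIn, hlt⟩)
        simp only [Bool.not_eq_true] at hIn
        simp at hIn
        simp [hIn, hr]
  rw [hfc]
  simp [pvAcc, List.range_succ]

-- A's final pass appends the distinct unmatched (rank-6) suggestions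
lemma pvStepRem (sugg : List String) :
    sugg.foldl (fun prioritized suggestion =>
        if !(prioritized.contains suggestion) then prioritized ++ [suggestion] else prioritized)
        (pvAcc sugg 6)
      = pvAcc sugg 7 := by
  have h : sugg.foldl (fun prioritized suggestion =>
        if !(prioritized.contains suggestion) then prioritized ++ [suggestion] else prioritized)
        (pvAcc sugg 6)
      = sugg.foldl (fun ac s => if (fun _ => true) s && !(ac.contains s) then ac ++ [s] else ac)
        (pvAcc sugg 6) := by
    simp
  rw [h, pvFoldG, List.filter_true]
  have hfc : (PySem.List.dedup sugg).filter (fun s => !((pvAcc sugg 6).contains s))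
      = pvBucket sugg 6 := by
    apply List.filter_congr
    intro s hs
    have hsm : s ∈ sugg := (PySem.List.mem_dedup _ _).mp hs
    have h6 := pvRank_le s
    by_cases hr : pvRank s = 6
    · have hnm : s ∉ pvAcc sugg 6 := by rw [mem_pvAcc]; rintro ⟨-, h⟩; omega
      simp [hnm, hr]
    · have hmem : s ∈ pvAcc sugg 6 := (mem_pvAcc sugg 6 s).mpr ⟨hsm, by omega⟩
      simp [hmem, hr]
  rw [hfc]
  simp [pvAcc, List.range_succ]

lemma pvA_eq (sugg : List String) : prioritize_suggestions_py sugg = pvAcc sugg 7 := by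
  have e0 : sugg.foldl (fun prioritized suggestion =>
      if PySem.Str.isIn "color scheme" (PySem.Str.lower suggestion)
          && !(prioritized.contains suggestion)
      then prioritized ++ [suggestion] else prioritized) ([] : List String) = pvAcc sugg 1 :=
    pvStepA sugg 0 (by omega)
  have e1 : sugg.foldl (fun prioritized suggestion =>
      if PySem.Str.isIn "typography" (PySem.Str.lower suggestion)
          && !(prioritized.contains suggestion)
      then prioritized ++ [suggestion] else prioritized) (pvAcc sugg 1) = pvAcc sugg 2 :=
    pvStepA sugg 1 (by omega)
  have e2 : sugg.foldl (fun prioritized suggestion =>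
      if PySem.Str.isIn "layout" (PySem.Str.lower suggestion)
          && !(prioritized.contains suggestion)
      then prioritized ++ [suggestion] else prioritized) (pvAcc sugg 2) = pvAcc sugg 3 :=
    pvStepA sugg 2 (by omega)
  have e3 : sugg.foldl (fun prioritized suggestion =>
      if PySem.Str.isIn "components" (PySem.Str.lower suggestion)
          && !(prioritized.contains suggestion)
      then prioritized ++ [suggestion] else prioritized) (pvAcc sugg 3) = pvAcc sugg 4 :=
    pvStepA sugg 3 (by omega)
  have e4 : sugg.foldl (fun prioritized suggestion =>
      if PySem.Str.isIn "accessibility" (PySem.Str.lower suggestion)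
          && !(prioritized.contains suggestion)
      then prioritized ++ [suggestion] else prioritized) (pvAcc sugg 4) = pvAcc sugg 5 :=
    pvStepA sugg 4 (by omega)
  have e5 : sugg.foldl (fun prioritized suggestion =>
      if PySem.Str.isIn "performance" (PySem.Str.lower suggestion)
          && !(prioritized.contains suggestion)
      then prioritized ++ [suggestion] else prioritized) (pvAcc sugg 5) = pvAcc sugg 6 :=
    pvStepA sugg 5 (by omega)
  have er := pvStepRem sugg
  unfold prioritize_suggestions_py
  simp only [pvPriorityOrder, List.foldl_cons, List.foldl_nil]
  rw [e0, e1, e2, e3, e4, e5, er]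

-- B's bucketing loop, fused into a per-index description of the final buckets
lemma pvBucketLoop (l : List String) (bs : List (List String)) :
    l.foldl (fun bs s => bs.modify (pvRank s) (fun b => b ++ [s])) bs
      = bs.mapIdx (fun i b => b ++ l.filter (fun s => pvRank s == i)) := by
  induction l generalizing bs with
  | nil =>
    apply List.ext_getElem
    · simp
    · intro j h1 h2
      simp [List.getElem_mapIdx]
  | cons x t ih =>
    simp only [List.foldl_cons]
    rw [ih]
    apply List.ext_getElem
    · simp
    · intro j h1 h2
      simp only [List.getElem_mapIdx, List.getElem_modify]
      by_cases hj : pvRank x = j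
      · simp [hj, List.append_assoc]
      · have hb : (pvRank x == j) = false := by simpa using hj
        simp [hj, hb]

lemma pvB_eq (sugg : List String) : prioritize_suggestions_py_alt sugg = pvAcc sugg 7 := by
  rw [show prioritize_suggestions_py_alt sugg
      = ((PySem.List.dedup sugg).foldl (fun bs s => bs.modify (pvRank s) (fun b => b ++ [s]))
          (List.replicate (pvPriorityOrder.length + 1) [])).foldl (fun out b => out ++ b) []
    from rfl]
  rw [pvBucketLoop, PySem.List.foldl_append_eq_flatten]
  have hrep : ∀ g : Nat → List String,
      (List.replicate (pvPriorityOrder.length + 1) ([] : List String)).mapIdx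
          (fun i b => b ++ g i)
        = [g 0, g 1, g 2, g 3, g 4, g 5, g 6] := fun g => rfl
  rw [hrep]
  simp [pvAcc, pvBucket, List.range_succ]

-- ===== VERDICT (by name: the statement is the Claim_ definition above) =====
theorem prioritize_suggestions_py_spec : Claim_equal_prioritize_suggestions_py := by
  intro sugg _
  unfold Spec_prioritize_suggestions_py
  rw [pvA_eq, pvB_eq]
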